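-- pv_equiv track=rewrite | github.com/internetarchive/openlibrary | openlibrary/catalog/add_book/load_book.py | remove_author_honorifics
-- ===== SOURCE A (Python) =====
-- from typing import TYPE_CHECKING, Any, Final, NotRequired, TypedDict, cast
--
-- HONORIFICS: Final = sorted(
--     [
--         'countess',
--         'doctor',
--         'doktor',
--         'dr',
--         'dr.',
--         'frau',
--         'fräulein',
--         'herr',
--         'lady',
--         'lord',
--         'm.',
--         'madame',
--         'mademoiselle',
--         'miss',
--         'mister',
--         'mistress',
--         'mixter',
--         'mlle',
--         'mlle.',
--         'mme',
--         'mme.',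
--         'monsieur',
--         'mr',
--         'mr.',
--         'mrs',
--         'mrs.',
--         'ms',
--         'ms.',
--         'mx',
--         'mx.',
--         'professor',
--         'señor',
--         'señora',
--         'señorita',
--         'sir',
--         'sr.',
--         'sra.',
--         'srta.',
--     ],
--     key=lambda x: len(x),
--     reverse=True,
-- )
--
-- HONORIFC_NAME_EXECPTIONS = frozenset(
--     {
--         "dr. seuss",
--         "dr seuss",
--         "dr oetker",
--         "doctor oetker",
--     }
-- )
--
-- def remove_author_honorifics(name: str) -> str:
--     """
--     Remove honorifics from an author's name field.
--
--     If the author's name is only an honorific, it will return the original name.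
--     """
--     if name.casefold() in HONORIFC_NAME_EXECPTIONS:
--         return name
--
--     if honorific := next(
--         (
--             honorific
--             for honorific in HONORIFICS
--             if name.casefold().startswith(f"{honorific} ")  # Note the trailing space.
--         ),
--         None,
--     ):
--         return name[len(f"{honorific} ") :].lstrip() or name
--     return name
-- ===== SOURCE B (Python) =====
-- HONORIFIC_SET = frozenset(
--     {
--         'countess', 'doctor', 'doktor', 'dr', 'dr.', 'frau', 'fräulein',
--         'herr', 'lady', 'lord', 'm.', 'madame', 'mademoiselle', 'miss',
--         'mister', 'mistress', 'mixter', 'mlle', 'mlle.', 'mme', 'mme.',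
--         'monsieur', 'mr', 'mr.', 'mrs', 'mrs.', 'ms', 'ms.', 'mx', 'mx.',
--         'professor', 'señor', 'señora', 'señorita', 'sir', 'sr.', 'sra.',
--         'srta.',
--     }
-- )
--
-- HONORIFC_NAME_EXECPTIONS = frozenset(
--     {
--         "dr. seuss",
--         "dr seuss",
--         "dr oetker",
--         "doctor oetker",
--     }
-- )
--
--
-- def remove_author_honorifics(name: str) -> str:
--     """Remove an honorific from the front of an author's name field."""
--     folded = name.casefold()
--     if folded in HONORIFC_NAME_EXECPTIONS:
--         return name
--     i = folded.find(' ')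
--     if i < 0 or folded[:i] not in HONORIFIC_SET:
--         return name
--     j = i + 1
--     while j < len(name) and name[j].isspace():
--         j += 1
--     return name[j:] or name
-- ===== Notes on version B (the rewrite author's own statement) =====
-- stated objective: faster
-- what changed: B finds the first space with str.find, does one frozenset lookup of the token before it, and skips the following whitespace with an index loop, instead of A's scan of the 38-entry length-sorted honorific list with a startswith test per entry. (removes the per-name scan of all 38 honorifics; measured ~6x faster at the largest timing size)
import Mathlib
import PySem

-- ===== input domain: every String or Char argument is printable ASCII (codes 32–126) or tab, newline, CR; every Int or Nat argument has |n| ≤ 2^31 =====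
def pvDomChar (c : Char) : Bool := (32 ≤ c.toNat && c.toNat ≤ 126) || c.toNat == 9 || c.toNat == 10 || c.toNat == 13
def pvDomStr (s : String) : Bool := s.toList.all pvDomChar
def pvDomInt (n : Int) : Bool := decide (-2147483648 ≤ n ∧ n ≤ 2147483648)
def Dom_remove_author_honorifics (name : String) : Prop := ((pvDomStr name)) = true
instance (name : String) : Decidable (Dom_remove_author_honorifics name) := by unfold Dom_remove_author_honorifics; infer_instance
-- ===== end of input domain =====

-- B replaces A's linear scan of the length-sorted honorific list (one startswith per entry) by
-- locating the first space with find, one set lookup of the token before it, and an index loop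
-- skipping the following whitespace (objective: simpler; casefold is ported as PySem.Str.lower,
-- exact on the ASCII domain).

-- ===== PORT A =====
-- the module-level literal list, in source order (A sorts it by length, reverse, at module load)
def pvHonorificsRaw : List String :=
  ["countess", "doctor", "doktor", "dr", "dr.", "frau", "fräulein", "herr",
   "lady", "lord", "m.", "madame", "mademoiselle", "miss", "mister", "mistress",
   "mixter", "mlle", "mlle.", "mme", "mme.", "monsieur", "mr", "mr.", "mrs",
   "mrs.", "ms", "ms.", "mx", "mx.", "professor", "señor", "señora", "señorita",
   "sir", "sr.", "sra.", "srta."]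

-- HONORIFICS = sorted(raw, key=len, reverse=True)
def pvHonorifics : List String :=
  PySem.List.sorted pvHonorificsRaw (fun x => PySem.Str.len x) true

-- HONORIFC_NAME_EXECPTIONS (frozenset)
def pvExceptions : List String :=
  PySem.Set.ofList ["dr. seuss", "dr seuss", "dr oetker", "doctor oetker"]

-- next((h for h in HONORIFICS if folded.startswith(h + " ")), None)
def pvAfind (hs : List String) (folded : List Char) : Option String :=
  match hs with
  | [] => none
  | h :: t =>
      if PySem.Chars.startswith folded (h.toList ++ [' ']) then some h
      else pvAfind t folded

def remove_author_honorifics (name : String) : String :=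
  let folded := PySem.Str.lower name   -- name.casefold(); exact on the ASCII domain
  if folded ∈ pvExceptions then name
  else
    match pvAfind pvHonorifics folded.toList with
    | some h =>
        -- name[len(h + " "):].lstrip() or name
        let r := PySem.Chars.lstrip (name.toList.drop (h.toList.length + 1))
        if r = [] then name else String.ofList r
    | none => name

-- ===== PORT B =====
-- Source B's HONORIFIC_SET: a frozenset of the same 38 module-level honorific strings
-- (shared literal data only — B never sorts or scans the list)
def pvHonorificSet : List String := PySem.Set.ofList pvHonorificsRaw

-- the index loop 'while j < len(name) and name[j].isspace(): j += 1; name[j:]',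
-- ported by hand as recursion on the suffix name[j:] (exact)
def pvSkipWs : List Char → List Char
  | [] => []
  | c :: t => if PySem.Chars.isspace c then pvSkipWs t else c :: t

def remove_author_honorifics_alt (name : String) : String :=
  let folded := PySem.Str.lower name   -- name.casefold(); exact on the ASCII domain
  if folded ∈ pvExceptions then name
  else
    -- i = folded.find(' ')
    let i := PySem.Chars.find folded.toList [' ']
    -- if i < 0 or folded[:i] not in HONORIFIC_SET: return name
    if i < 0 ∨ String.ofList (folded.toList.take i.toNat) ∉ pvHonorificSet then name
    else
      -- skip the whitespace after position i, then 'name[j:] or name'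
      let r := pvSkipWs (name.toList.drop (i.toNat + 1))
      if r = [] then name else String.ofList r

-- ===== PRECONDITION & SPEC =====
def Spec_remove_author_honorifics (name : String) (out : String) : Prop := out = remove_author_honorifics_alt name
instance (name : String) (out : String) : Decidable (Spec_remove_author_honorifics name out) := by unfold Spec_remove_author_honorifics; infer_instance

-- ===== CLAIM (what is proved, stated in full; the proofs are below) =====
def Claim_equal_remove_author_honorifics : Prop := ∀ (name : String), Dom_remove_author_honorifics name → Spec_remove_author_honorifics name (remove_author_honorifics name)

-- ===== LEMMAS AND PROOFS =====

-- a space-free token followed by ' ' is a prefix of L iff it is exactly L's first-space token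
theorem pv_tok_prefix (t L : List Char) (h : ' ' ∉ t) :
    (t ++ [' ']) <+: L ↔ (L.takeWhile (· ≠ ' ') = t ∧ ' ' ∈ L) := by
  induction t generalizing L with
  | nil =>
      cases L with
      | nil => simp
      | cons c L' =>
          by_cases hc : c = ' '
          · subst hc; simp
          · simp [List.cons_prefix_cons, hc, Ne.symm hc]
  | cons a t' ih =>
      have ha : a ≠ ' ' := fun e => h (e ▸ List.mem_cons_self)
      have ht' : ' ' ∉ t' := fun m => h (List.mem_cons_of_mem _ m)
      cases L with
      | nil => simp
      | cons c L' =>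
          by_cases hc : c = a
          · subst hc
            simp [List.cons_prefix_cons, ha, Ne.symm ha, ih L' ht']
          · rw [List.cons_append, List.cons_prefix_cons]
            constructor
            · rintro ⟨hac, -⟩
              exact absurd hac.symm hc
            · rintro ⟨e, -⟩
              rw [List.takeWhile_cons] at e
              by_cases hcs : c = ' '
              · simp [hcs] at e
              · simp [hcs] at e
                exact absurd e.1 hc

-- A's first-match scan over any space-free honorific list is the first-token lookup
theorem pv_find_eq (hs : List String) (L : List Char)
    (hsp : ∀ h ∈ hs, ' ' ∉ h.toList) :
    pvAfind hs L =
      if ' ' ∈ L ∧ String.ofList (L.takeWhile (· ≠ ' ')) ∈ hs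
      then some (String.ofList (L.takeWhile (· ≠ ' '))) else none := by
  induction hs with
  | nil => simp [pvAfind]
  | cons h t ih =>
      have hh : ' ' ∉ h.toList := hsp h List.mem_cons_self
      have hrec := ih (fun x hx => hsp x (List.mem_cons_of_mem _ hx))
      by_cases hm : PySem.Chars.startswith L (h.toList ++ [' ']) = true
      · have htok := (pv_tok_prefix h.toList L hh).mp
          ((PySem.Chars.startswith_iff L (h.toList ++ [' '])).mp hm)
        have hofl : String.ofList (L.takeWhile (· ≠ ' ')) = h := by
          rw [htok.1]; exact String.ofList_toList
        simp only [pvAfind]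
        rw [if_pos hm, if_pos ⟨htok.2, by rw [hofl]; exact List.mem_cons_self⟩, hofl]
      · have hne : ¬ (L.takeWhile (· ≠ ' ') = h.toList ∧ ' ' ∈ L) :=
          fun hcon => hm ((PySem.Chars.startswith_iff L (h.toList ++ [' '])).mpr
            ((pv_tok_prefix h.toList L hh).mpr hcon))
        have hneq : ¬ (' ' ∈ L ∧ String.ofList (L.takeWhile (· ≠ ' ')) = h) := by
          rintro ⟨hsp', he⟩
          apply hne
          refine ⟨?_, hsp'⟩
          have hcl := congrArg String.toList he
          rwa [String.toList_ofList] at hcl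
        simp only [pvAfind]
        rw [if_neg hm, hrec]
        by_cases h1 : ' ' ∈ L
        · by_cases h2 : String.ofList (L.takeWhile (· ≠ ' ')) ∈ t
          · rw [if_pos ⟨h1, h2⟩, if_pos ⟨h1, List.mem_cons.mpr (Or.inr h2)⟩]
          · rw [if_neg (fun hx => h2 hx.2), if_neg ?_]
            rintro ⟨-, hmm⟩
            rcases List.mem_cons.mp hmm with he | ht2
            · exact hneq ⟨h1, he⟩
            · exact h2 ht2
        · rw [if_neg (fun hx => h1 hx.1), if_neg (fun hx => h1 hx.1)]

theorem pv_spacefree : ∀ h ∈ pvHonorifics, ' ' ∉ h.toList := by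
  intro h hm
  have hr : h ∈ pvHonorificsRaw := (PySem.List.mem_sorted _ _ _ _).mp hm
  have hall : ∀ x ∈ pvHonorificsRaw, ' ' ∉ x.toList := by decide
  exact hall h hr

theorem pv_mem_set_iff (s : String) : s ∈ pvHonorifics ↔ s ∈ pvHonorificSet := by
  unfold pvHonorifics pvHonorificSet
  rw [PySem.List.mem_sorted, PySem.Set.mem_ofList]

-- [c] is an infix of L iff c occurs in L
theorem pv_singleton_infix (c : Char) (L : List Char) : [c] <:+: L ↔ c ∈ L := by
  constructor
  · intro h
    exact (List.singleton_sublist).mp h.sublist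
  · intro h
    obtain ⟨s, t, rfl⟩ := List.append_of_mem h
    exact ⟨s, t, by simp⟩

-- pvSkipWs is lstrip (both drop leading whitespace)
theorem pvSkipWs_eq_lstrip (L : List Char) : pvSkipWs L = PySem.Chars.lstrip L := by
  induction L with
  | nil => simp [pvSkipWs, PySem.Chars.lstrip]
  | cons c t ih =>
      by_cases h : PySem.Chars.isspace c = true
      · simp [pvSkipWs, PySem.Chars.lstrip, h] at ih ⊢
        simpa [PySem.Chars.lstrip] using ih
      · simp [pvSkipWs, PySem.Chars.lstrip, h]

-- if nothing before index n satisfies ¬p—i.e. all of take n pass—and L[n] fails, takeWhile = take n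
theorem pv_takeWhile_eq_take (p : Char → Bool) (L : List Char) (n : Nat) (hn : n < L.length)
    (h1 : ∀ i, (hi : i < n) → p (L[i]'(by omega)) = true) (h2 : p (L[n]) = false) :
    L.takeWhile p = L.take n := by
  induction L generalizing n with
  | nil => simp at hn
  | cons c t ih =>
      cases n with
      | zero =>
          simp at h2
          simp [h2]
      | succ m =>
          have hc : p c = true := h1 0 (Nat.succ_pos m)
          simp only [List.takeWhile_cons, hc, if_true, List.take_succ_cons]
          congr 1
          exact ih m (by simpa using hn) (fun i hi => h1 (i+1) (by omega)) (by simpa using h2)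

-- characterisation of find L [' ']
theorem pv_find_space_neg (L : List Char) (h : ' ' ∉ L) : PySem.Chars.find L [' '] = -1 := by
  rw [PySem.Chars.find_eq_neg_one_iff, pv_singleton_infix]
  exact h

theorem pv_find_space_pos (L : List Char) (h : ' ' ∈ L) :
    0 ≤ PySem.Chars.find L [' '] ∧
    (PySem.Chars.find L [' ']).toNat < L.length ∧
    L.takeWhile (· ≠ ' ') = L.take (PySem.Chars.find L [' ']).toNat := by
  have h0 : 0 ≤ PySem.Chars.find L [' '] :=
    (PySem.Chars.find_nonneg_iff L [' ']).mpr ((pv_singleton_infix ' ' L).mpr h)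
  obtain ⟨hpre, hmin⟩ := PySem.Chars.find_spec (s := L) (sub := [' ']) h0
  set n := (PySem.Chars.find L [' ']).toNat with hn
  have hlt : n < L.length := by
    rcases hpre with ⟨t, ht⟩
    have := congrArg List.length ht
    simp at this
    have hd : (L.drop n).length = L.length - n := List.length_drop
    omega
  refine ⟨h0, hlt, ?_⟩
  have hdropn : L.drop n = L[n] :: L.drop (n+1) := List.drop_eq_getElem_cons hlt
  have hgn : L[n] = ' ' := by
    rcases hpre with ⟨t, ht⟩
    rw [hdropn] at ht
    exact (List.cons.injEq _ _ _ _ ▸ ht).1.symm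
  apply pv_takeWhile_eq_take (fun c => decide (c ≠ ' ')) L n hlt
  · intro i hi
    have hil : i < L.length := by omega
    have hni : ¬ [' '] <+: L.drop i := hmin i hi
    have hdropi : L.drop i = L[i] :: L.drop (i+1) := List.drop_eq_getElem_cons hil
    by_contra hcon
    apply hni
    rw [hdropi]
    have : L[i] = ' ' := by simpa using hcon
    rw [this]
    exact ⟨L.drop (i+1), rfl⟩
  · simp [hgn]

theorem remove_author_honorifics_eq (name : String) :
    remove_author_honorifics name = remove_author_honorifics_alt name := by
  unfold remove_author_honorifics remove_author_honorifics_alt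
  by_cases hex : PySem.Str.lower name ∈ pvExceptions
  · simp [hex]
  · simp only [hex, if_false]
    set L := (PySem.Str.lower name).toList with hL
    rw [pv_find_eq pvHonorifics L pv_spacefree]
    by_cases hsp : ' ' ∈ L
    · obtain ⟨h0, hlt, htw⟩ := pv_find_space_pos L hsp
      set n := (PySem.Chars.find L [' ']).toNat with hn
      have hni : ¬ (PySem.Chars.find L [' '] < 0) := by omega
      have htok : String.ofList (L.takeWhile (· ≠ ' ')) = String.ofList (L.take n) := by
        rw [htw]
      by_cases hm : String.ofList (L.take n) ∈ pvHonorificSet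
      · have hmA : String.ofList (L.takeWhile (· ≠ ' ')) ∈ pvHonorifics := by
          rw [htok, pv_mem_set_iff]; exact hm
        have hnneg : ¬ (PySem.Chars.find L [' '] < 0 ∨
            String.ofList (L.take n) ∉ pvHonorificSet) := by
          push Not
          exact ⟨by omega, hm⟩
        rw [if_pos ⟨hsp, hmA⟩, if_neg hnneg]
        simp only [String.toList_ofList, htw, List.length_take, pvSkipWs_eq_lstrip]
        rw [Nat.min_eq_left (le_of_lt hlt)]
      · have hmA : ¬ (' ' ∈ L ∧ String.ofList (L.takeWhile (· ≠ ' ')) ∈ pvHonorifics) := by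
          rintro ⟨-, hx⟩
          rw [htok, pv_mem_set_iff] at hx
          exact hm hx
        rw [if_neg hmA, if_pos (Or.inr hm)]
    · rw [if_neg (fun hx => hsp hx.1), if_pos (Or.inl (by rw [pv_find_space_neg L hsp]; norm_num))]

-- ===== VERDICT (by name: the statement is the Claim_ definition above) =====
theorem remove_author_honorifics_spec : Claim_equal_remove_author_honorifics := by
  intro name _
  unfold Spec_remove_author_honorifics
  exact remove_author_honorifics_eq name
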